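-- pv_equiv track=rewrite | github.com/ayoubc/competitive-programming | online_judges/codechef/COMPILER.py | solve
-- ===== SOURCE A (Python) =====
-- def solve(text):
--     ans = 0
--     stack = []
--     for i in range(len(text)):
--         c = text[i]
--         if c == '<':
--             stack.append(c)
--
--         else:
--             if len(stack) > 0:
--                 if stack[-1] == '<':
--                     stack.pop()
--                     if len(stack) == 0:
--                         ans = i + 1
--                 else:
--                     stack.append(c)
--             else:
--                 stack.append(c)
--     if len(stack) == 0:
--         ans = len(text)
--     return ans
-- ===== SOURCE B (Python) =====
-- def solve(text):
--     # staged: build prefix-balance array, find first corruption point, then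
--     # scan backwards before it for the last position where balance hits zero
--     pref = []
--     bal = 0
--     for c in text:
--         bal += 1 if c == '<' else -1
--         pref.append(bal)
--     cut = len(pref)
--     for j, b in enumerate(pref):
--         if b < 0:
--             cut = j
--             break
--     if cut == len(pref) and bal == 0:
--         return len(text)
--     for j in range(cut - 1, -1, -1):
--         if pref[j] == 0:
--             return j + 1
--     return 0
-- ===== Notes on version B (the rewrite author's own statement) =====
-- stated objective: alternative
-- what changed: Replaces the one-pass stack simulation by three staged passes over a prefix-balance array: build the array, find the first index where the balance goes negative (the corruption cut), then scan backwards before the cut for the last position where the balance is zero; a timing run measured this constant-factor change (no list append/pop per char, cheap int array passes) as faster.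
import Mathlib
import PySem

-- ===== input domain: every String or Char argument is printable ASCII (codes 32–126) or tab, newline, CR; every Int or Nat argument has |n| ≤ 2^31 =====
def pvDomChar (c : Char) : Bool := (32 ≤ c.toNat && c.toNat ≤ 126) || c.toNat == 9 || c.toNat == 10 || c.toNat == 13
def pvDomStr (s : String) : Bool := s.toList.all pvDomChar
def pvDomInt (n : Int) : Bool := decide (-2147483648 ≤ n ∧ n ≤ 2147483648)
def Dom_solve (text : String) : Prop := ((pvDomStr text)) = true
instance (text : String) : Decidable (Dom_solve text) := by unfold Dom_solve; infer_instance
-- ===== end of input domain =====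

-- B replaces A's one-pass stack simulation by three staged passes over a prefix-balance
-- array (build, find first-negative cut, scan backwards for the last zero); the return
-- values are proved equal on all inputs.

-- ===== PORT A =====
-- A's for-loop over i in range(len(text)) with text[i], carrying (ans, stack);
-- the index i is carried explicitly, the stack grows/pops at its end as in Python.
def solveLoop : List Char → Int → Int → List Char → Int × List Char
  | [], _, ans, stack => (ans, stack)
  | c :: rest, i, ans, stack =>
    if c = '<' then solveLoop rest (i + 1) ans (stack ++ [c])
    else
      if stack ≠ [] then
        if stack.getLast? = some '<' then
          let s' := stack.dropLast
          solveLoop rest (i + 1) (if s' = [] then i + 1 else ans) s'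
        else solveLoop rest (i + 1) ans (stack ++ [c])
      else solveLoop rest (i + 1) ans (stack ++ [c])

def solve (text : String) : Int :=
  let r := solveLoop text.toList 0 0 []
  if r.2 = [] then (text.toList.length : Int) else r.1

-- ===== PORT B =====
-- Source B's first loop: builds the prefix-balance list and the final balance.
def buildPref : List Char → Int → List Int × Int
  | [], bal => ([], bal)
  | c :: rest, bal =>
    let b := bal + (if c = '<' then 1 else -1)
    let r := buildPref rest b
    (b :: r.1, r.2)

-- Source B's second loop: index of the first negative prefix balance (length if none).
def firstNeg : List Int → Nat
  | [] => 0
  | b :: rest => if b < 0 then 0 else firstNeg rest + 1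

-- Source B's backward loop over range(cut-1,-1,-1): last j < cut with pref[j] == 0.
def lastZero (pref : List Int) : Nat → Int
  | 0 => 0
  | j + 1 => if pref.getD j 0 = 0 then (j : Int) + 1 else lastZero pref j

def solve_alt (text : String) : Int :=
  let chars := text.toList
  let r := buildPref chars 0
  let cut := firstNeg r.1
  if cut = chars.length ∧ r.2 = 0 then (chars.length : Int)
  else lastZero r.1 cut

-- ===== PRECONDITION & SPEC =====
def Spec_solve (text : String) (out : Int) : Prop := out = solve_alt text
instance (text : String) (out : Int) : Decidable (Spec_solve text out) := by unfold Spec_solve; infer_instance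

-- ===== CLAIM (what is proved, stated in full; the proofs are below) =====
def Claim_equal_solve : Prop := ∀ (text : String), Dom_solve text → Spec_solve text (solve text)

-- ===== LEMMAS AND PROOFS =====

-- Proof-only intermediate: the single-pass balance-counter loop.
def solveAltLoop (n : Int) : List Char → Int → Int → Int → Int
  | [], _, bal, ans => if bal = 0 then n else ans
  | c :: rest, i, bal, ans =>
    if c = '<' then solveAltLoop n rest (i + 1) (bal + 1) ans
    else if bal > 0 then
      solveAltLoop n rest (i + 1) (bal - 1) (if bal - 1 = 0 then i + 1 else ans)
    else ans

-- Proof-only generalisation of lastZero with an index offset and a default.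
def LZ (p : List Int) : Nat → Int → Int → Int
  | 0, _, ans => ans
  | j + 1, i, ans => if p.getD j 0 = 0 then i + j + 1 else LZ p j i ans

-- Once A's stack has a non-'<' character at its bottom it never empties and ans is frozen.
theorem solveLoop_corrupt (rest : List Char) : ∀ (i ans : Int) (c0 : Char) (t : List Char),
    c0 ≠ '<' → ∃ t', solveLoop rest i ans (c0 :: t) = (ans, c0 :: t') := by
  induction rest with
  | nil => intro i ans c0 t h; exact ⟨t, rfl⟩
  | cons c rest ih =>
    intro i ans c0 t h
    by_cases hc : c = '<'
    · simpa [solveLoop, hc] using ih (i + 1) ans c0 (t ++ ['<']) h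
    · by_cases hl : (c0 :: t).getLast? = some '<'
      · have ht : t ≠ [] := by
          intro ht; rw [ht] at hl; simp at hl; exact h hl
        have hdrop : (c0 :: t).dropLast = c0 :: t.dropLast := by
          cases t with
          | nil => exact absurd rfl ht
          | cons a s => simp
        simpa [solveLoop, hc, hl, hdrop] using ih (i + 1) ans c0 t.dropLast h
      · simpa [solveLoop, hc, hl] using ih (i + 1) ans c0 (t ++ [c]) h

-- While the stack is a pile of b '<'s, A's loop computes exactly the balance-counter loop.
theorem solveLoop_good (rest : List Char) : ∀ (i ans : Int) (b : ℕ) (n : Int),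
    (let r := solveLoop rest i ans (List.replicate b '<');
      if r.2 = [] then n else r.1) = solveAltLoop n rest i (b : Int) ans := by
  induction rest with
  | nil =>
    intro i ans b n
    cases b with
    | zero => simp [solveLoop, solveAltLoop]
    | succ b =>
      simp only [solveLoop, solveAltLoop]
      have : ¬ ((b : Int) + 1 = 0) := by omega
      simp [this, push_cast]
  | cons c rest ih =>
    intro i ans b n
    by_cases hc : c = '<'
    · have h := ih (i + 1) ans (b + 1) n
      simpa [solveLoop, solveAltLoop, hc, ← List.replicate_succ' (n := b),
        push_cast] using h
    · cases b with
      | zero =>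
        have hcor := solveLoop_corrupt rest (i + 1) ans c [] hc
        obtain ⟨t', ht'⟩ := hcor
        simp [solveLoop, solveAltLoop, hc, ht']
      | succ b =>
        have hlast : (List.replicate (b + 1) '<').getLast? = some '<' := by
          simp [List.getLast?_replicate]
        have hdrop : (List.replicate (b + 1) '<').dropLast = List.replicate b '<' := by
          simp [List.dropLast_replicate]
        have h := ih (i + 1) (if List.replicate b '<' = ([] : List Char) then i + 1 else ans) b n
        have hpos : ((b : Int) + 1) > 0 := by positivity
        by_cases hb : b = 0
        · subst hb
          simpa [solveLoop, solveAltLoop, hc, hlast, hdrop, hpos] using h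
        · have hbn : List.replicate b '<' ≠ ([] : List Char) := by
            simp [List.replicate_eq_nil_iff, hb]
          simpa [solveLoop, solveAltLoop, hc, hlast, hdrop, hbn, hb, hpos] using h

theorem LZ_cons (b : Int) (p : List Int) : ∀ (j : Nat) (i ans : Int),
    LZ (b :: p) (j + 1) i ans = LZ p j (i + 1) (if b = 0 then i + 1 else ans) := by
  intro j
  induction j with
  | zero => intro i ans; simp [LZ]
  | succ j ih =>
    intro i ans
    simp only [LZ, List.getD_cons_succ]
    by_cases h : p.getD j 0 = 0
    · rw [if_pos h, if_pos h]; push_cast; ring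
    · rw [if_neg h, if_neg h]; exact ih i ans

theorem lastZero_eq_LZ (p : List Int) : ∀ (j : Nat), lastZero p j = LZ p j 0 0 := by
  intro j
  induction j with
  | zero => rfl
  | succ j ih =>
    simp only [lastZero, LZ, ih]
    by_cases h : p.getD j 0 = 0 <;> simp [h]

-- The balance-counter loop equals B's staged computation, for any start state.
theorem altLoop_staged (n : Int) (chars : List Char) : ∀ (i bal ans : Int), 0 ≤ bal →
    solveAltLoop n chars i bal ans =
      (if firstNeg (buildPref chars bal).1 = chars.length ∧ (buildPref chars bal).2 = 0 then n
       else LZ (buildPref chars bal).1 (firstNeg (buildPref chars bal).1) i ans) := by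
  induction chars with
  | nil =>
    intro i bal ans _
    by_cases h : bal = 0 <;> simp [solveAltLoop, buildPref, firstNeg, LZ, h]
  | cons c rest ih =>
    intro i bal ans hbal
    by_cases hc : c = '<'
    · have hnn : ¬ (bal + 1 < 0) := by omega
      have hne : ¬ (bal + 1 = 0) := by omega
      rw [show solveAltLoop n (c :: rest) i bal ans
            = solveAltLoop n rest (i + 1) (bal + 1) ans by simp [solveAltLoop, hc]]
      rw [ih (i + 1) (bal + 1) ans (by omega)]
      simp only [buildPref, hc]
      simp [firstNeg, hnn, LZ_cons, hne, List.length_cons]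
    · by_cases hpos : bal > 0
      · have hnn : ¬ (bal + -1 < 0) := by omega
        rw [show solveAltLoop n (c :: rest) i bal ans
              = solveAltLoop n rest (i + 1) (bal - 1) (if bal - 1 = 0 then i + 1 else ans) by
            simp [solveAltLoop, hc, hpos]]
        rw [ih (i + 1) (bal - 1) _ (by omega)]
        simp only [buildPref, if_neg hc]
        have hsub : bal + -1 = bal - 1 := by ring
        rw [hsub]
        have hlt : ¬ (bal - 1 < 0) := by omega
        simp [firstNeg, hlt, LZ_cons, List.length_cons]
      · have hb0 : bal = 0 := by omega
        have hneg : (bal + -1 < 0) := by omega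
        rw [show solveAltLoop n (c :: rest) i bal ans = ans by
            simp [solveAltLoop, hc, hpos]]
        simp [buildPref, hc, firstNeg, hneg, LZ]
-- ===== VERDICT (by name: the statement is the Claim_ definition above) =====
theorem solve_spec : Claim_equal_solve := by
  intro text _
  unfold Spec_solve solve solve_alt
  have h1 := solveLoop_good text.toList 0 0 0 (text.toList.length : Int)
  have h2 := altLoop_staged (text.toList.length : Int) text.toList 0 0 0 (le_refl 0)
  simp only [List.replicate_zero, Nat.cast_zero] at h1
  simp only [h1, h2, lastZero_eq_LZ]
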